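-- pv_equiv track=rewrite | github.com/luciobattisti/dsa | strings/words_subset.py | get_max_letter_counts
-- ===== SOURCE A (Python) =====
-- def get_letter_counts(word: str) -> dict:
--     output = {}
--     for c in word:
--         if c in output:
--             output[c] += 1
--         else:
--             output[c] = 1
--
--     return output
--
-- def get_max_letter_counts(words: list) -> dict:
--     output = {}
--     for w in words:
--
--         counts = get_letter_counts(w)
--
--         for k in counts:
--             if k not in output:
--                 output[k] = counts[k]
--             else:
--                 output[k] = max(output[k], counts[k])
--
--     return output
-- ===== SOURCE B (Python) =====
-- def get_max_letter_counts(words: list) -> dict: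
--     text = "".join(words)
--     return {ch: max((w.count(ch) for w in words), default=0)
--             for ch in dict.fromkeys(text)}
-- ===== Notes on version B (the rewrite author's own statement) =====
-- stated objective: simpler
-- what changed: Instead of walking word-by-word and merging per-word counters into a running max-dict, B transposes the loops: it dedups the concatenation once to get the letters in first-appearance order, then for each letter takes the max of str.count over all words.
import Mathlib
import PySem

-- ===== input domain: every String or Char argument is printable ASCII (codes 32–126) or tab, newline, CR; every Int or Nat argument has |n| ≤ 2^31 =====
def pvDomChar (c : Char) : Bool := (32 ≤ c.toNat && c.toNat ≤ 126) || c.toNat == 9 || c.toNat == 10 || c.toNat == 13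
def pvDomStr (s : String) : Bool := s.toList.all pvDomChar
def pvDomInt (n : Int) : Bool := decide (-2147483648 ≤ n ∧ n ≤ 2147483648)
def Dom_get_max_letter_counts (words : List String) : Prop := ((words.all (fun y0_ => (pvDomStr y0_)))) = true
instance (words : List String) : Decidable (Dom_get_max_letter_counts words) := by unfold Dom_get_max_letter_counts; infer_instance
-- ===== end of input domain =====

-- B replaces A's running max-merge of per-word counters by a letter-major transpose
-- (dedup the concatenation, then max of per-word counts per letter); objective: simpler.


-- Python iterates over the 1-character strings of a word; we represent them as such.
def strChars (w : String) : List String := w.toList.map (fun c => String.ofList [c])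

-- ===== PORT A =====
def get_letter_counts (word : String) : PySem.Dict String Int :=
  (strChars word).foldl
    (fun output c =>
      if output.contains c then output.insert c (output.getD c 0 + 1)
      else output.insert c 1)
    PySem.Dict.empty

def get_max_letter_counts (words : List String) : List (String × Int) :=
  (words.foldl
    (fun output w =>
      let counts := get_letter_counts w
      counts.keys.foldl
        (fun output k =>
          if !(output.contains k) then output.insert k (counts.getD k 0)
          else output.insert k (max (output.getD k 0) (counts.getD k 0)))
        output)
    PySem.Dict.empty).items

-- ===== PORT B =====
-- w.count(ch) for a 1-character ch is exactly the count of ch among w's characters.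
def get_max_letter_counts_alt (words : List String) : List (String × Int) :=
  let text := (words.map strChars).flatten
  (PySem.List.dedup text).map
    (fun ch =>
      (ch, PySem.List.maxD (words.map (fun w => ((strChars w).count ch : Int))) (fun x => x) 0))

-- ===== PRECONDITION & SPEC =====
def Spec_get_max_letter_counts (words : List String) (out : List (String × Int)) : Prop := out = get_max_letter_counts_alt words
instance (words : List String) (out : List (String × Int)) : Decidable (Spec_get_max_letter_counts words out) := by unfold Spec_get_max_letter_counts; infer_instance

-- ===== CLAIM (what is proved, stated in full; the proofs are below) =====
def Claim_equal_get_max_letter_counts : Prop := ∀ (words : List String), Dom_get_max_letter_counts words → Spec_get_max_letter_counts words (get_max_letter_counts words)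

-- ===== LEMMAS AND PROOFS =====

-- A's running max over all words (taken from 0) of the per-word count of letter k.
def vMax (k : String) (ws : List String) : Int :=
  (ws.map (fun w => ((strChars w).count k : Int))).foldl max 0

-- A's outer loop body, in canonical insert-of-ite form over the deduped letters of w.
def cstep (d : PySem.Dict String Int) (w : String) : PySem.Dict String Int :=
  (PySem.Set.ofList (strChars w)).foldl
    (fun o k =>
      o.insert k (if o.contains k then max (o.getD k 0) ((strChars w).count k : Int)
                  else ((strChars w).count k : Int)))
    d

lemma get_letter_counts_eq_counter (w : String) :
    get_letter_counts w = PySem.Dict.counter (strChars w) := by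
  unfold get_letter_counts
  refine (PySem.List.foldl_congr_mem _ _
      (fun (d : PySem.Dict String Int) c => d.insert c (d.getD c 0 + 1)) _ ?_).trans
    (PySem.Dict.foldl_insert_getD_add_one_eq_counter _)
  intro d c _
  by_cases h : d.contains c = true
  · simp [h]
  · have h0 : d.getD c 0 = 0 := PySem.Dict.getD_of_not_contains _ _ (by simpa using h)
    simp [h, h0]

lemma step_eq (d : PySem.Dict String Int) (w : String) :
    (let counts := get_letter_counts w
     counts.keys.foldl
       (fun output k =>
         if !(output.contains k) then output.insert k (counts.getD k 0)
         else output.insert k (max (output.getD k 0) (counts.getD k 0)))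
       d) = cstep d w := by
  show ((get_letter_counts w).keys.foldl _ d) = cstep d w
  rw [get_letter_counts_eq_counter]
  unfold cstep
  rw [PySem.Dict.keys_counter]
  apply PySem.List.foldl_congr_mem
  intro o k _
  by_cases h : o.contains k = true
  · simp [h, PySem.Dict.getD_counter]
  · simp [h, PySem.Dict.getD_counter]

lemma aDict_eq (ws : List String) :
    get_max_letter_counts ws = (ws.foldl cstep PySem.Dict.empty).items := by
  unfold get_max_letter_counts
  exact congrArg PySem.Dict.items
    (PySem.List.foldl_congr_mem _ _ cstep _ (fun d w _ => step_eq d w))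

lemma keys_nodup (ws : List String) : (ws.foldl cstep PySem.Dict.empty).keys.Nodup := by
  induction ws using List.reverseRecOn with
  | nil => simp [PySem.Dict.keys_empty]
  | append_singleton t w ih =>
      rw [List.foldl_append]
      exact PySem.Dict.nodup_keys_foldl_insert _ _ _ ih

lemma update_add (s acc : PySem.Set String) (x : String) :
    PySem.Set.update s (PySem.Set.add acc x) = PySem.Set.add (PySem.Set.update s acc) x := by
  by_cases h : acc.contains x = true
  · have hx : x ∈ acc := by simpa [PySem.Set.contains] using h
    have hadd : PySem.Set.add acc x = acc := by rw [PySem.Set.add, if_pos h]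
    have hc : (PySem.Set.update s acc).contains x = true := by
      simp [PySem.Set.contains, PySem.Set.mem_update]
      exact Or.inr hx
    rw [hadd]
    show _ = PySem.Set.add (PySem.Set.update s acc) x
    rw [PySem.Set.add, if_pos hc]
  · have hadd : PySem.Set.add acc x = acc ++ [x] := by rw [PySem.Set.add, if_neg h]
    rw [hadd]
    show PySem.Set.update s (acc ++ [x]) = _
    rw [PySem.Set.update_append]
    simp [PySem.Set.update]

lemma update_update (l : List String) :
    ∀ s acc : PySem.Set String,
      PySem.Set.update s (PySem.Set.update acc l) = PySem.Set.update (PySem.Set.update s acc) l := by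
  induction l with
  | nil => intro s acc; simp [PySem.Set.update]
  | cons x t ih =>
      intro s acc
      rw [PySem.Set.update_cons, PySem.Set.update_cons, ih, update_add]

lemma update_ofList (s : PySem.Set String) (l : List String) :
    PySem.Set.update s (PySem.Set.ofList l) = PySem.Set.update s l := by
  have h : PySem.Set.ofList l = PySem.Set.update PySem.Set.empty l := rfl
  rw [h, update_update]
  simp [PySem.Set.update, PySem.Set.empty]

lemma keys_eq (ws : List String) :
    (ws.foldl cstep PySem.Dict.empty).keys = PySem.Set.ofList ((ws.map strChars).flatten) := by
  induction ws using List.reverseRecOn with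
  | nil => simp [PySem.Dict.keys_empty, PySem.Set.ofList]
  | append_singleton t w ih =>
      rw [List.foldl_append]
      set D := t.foldl cstep PySem.Dict.empty with hD
      simp only [List.foldl_cons, List.foldl_nil]
      unfold cstep
      rw [PySem.Dict.keys_foldl_insert, update_ofList, ih, ← PySem.Set.ofList_append]
      simp

-- getD after a fold of inserts over distinct keys, each value read off the current entry.
lemma foldl_insert_getD_lookup (F : String → Bool → Int → Int) (ks : List String)
    (hnd : ks.Nodup) (d : PySem.Dict String Int) (k : String) :
    (ks.foldl (fun o j => o.insert j (F j (o.contains j) (o.getD j 0))) d).getD k 0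
      = if k ∈ ks then F k (d.contains k) (d.getD k 0) else d.getD k 0 := by
  induction ks generalizing d with
  | nil => simp
  | cons j t ih =>
      have hj : j ∉ t := (List.nodup_cons.mp hnd).1
      have ht : t.Nodup := (List.nodup_cons.mp hnd).2
      simp only [List.foldl_cons]
      rw [ih ht]
      by_cases hkj : k = j
      · subst hkj
        simp [hj, PySem.Dict.getD_insert_self]
      · rw [PySem.Dict.getD_insert_of_ne _ _ _ hkj, PySem.Dict.contains_insert]
        by_cases hkt : k ∈ t
        · have hb : (k == j) = false := beq_eq_false_iff_ne.mpr hkj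
          rw [hb, Bool.false_or]
          simp [hkt, hkj, List.mem_cons]
        · simp [hkt, hkj, List.mem_cons]

lemma cstep_getD (w : String) (d : PySem.Dict String Int) (k : String) :
    (cstep d w).getD k 0
      = if k ∈ strChars w then
          (if d.contains k then max (d.getD k 0) ((strChars w).count k : Int)
           else ((strChars w).count k : Int))
        else d.getD k 0 := by
  unfold cstep
  have h := foldl_insert_getD_lookup
    (fun j b v => if b then max v ((strChars w).count j : Int) else ((strChars w).count j : Int))
    (PySem.Set.ofList (strChars w)) (PySem.Set.nodup_ofList _) d k
  simpa [PySem.Set.mem_ofList] using h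

lemma vMax_nonneg (k : String) (ws : List String) : 0 ≤ vMax k ws :=
  (PySem.List.le_foldl_max _ _).1

lemma vMax_zero_of_not_mem {k : String} {ws : List String}
    (h : k ∉ (ws.map strChars).flatten) : vMax k ws = 0 := by
  unfold vMax
  induction ws with
  | nil => rfl
  | cons w t ih =>
      have hw : k ∉ strChars w := fun hk => h (by simp; exact Or.inl hk)
      have ht : k ∉ (t.map strChars).flatten := fun hk => by
        simp at hk
        obtain ⟨w', hw', hk⟩ := hk
        exact h (by simp; exact Or.inr ⟨w', hw', hk⟩)
      simp only [List.map_cons, List.foldl_cons]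
      rw [List.count_eq_zero.mpr hw]
      simpa using ih ht

lemma getD_eq (ws : List String) (k : String) :
    (ws.foldl cstep PySem.Dict.empty).getD k 0 = vMax k ws := by
  induction ws using List.reverseRecOn with
  | nil => simp [vMax, PySem.Dict.getD_empty]
  | append_singleton t w ih =>
      rw [List.foldl_append]
      set D := t.foldl cstep PySem.Dict.empty with hD
      simp only [List.foldl_cons, List.foldl_nil]
      rw [cstep_getD]
      have hv : vMax k (t ++ [w]) = max (vMax k t) ((strChars w).count k : Int) := by
        unfold vMax
        rw [List.map_append, List.foldl_append]
        rfl
      by_cases hkw : k ∈ strChars w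
      · rw [if_pos hkw]
        by_cases hc : D.contains k = true
        · rw [if_pos hc, ih, hv]
        · rw [if_neg hc, hv]
          have hk0 : vMax k t = 0 := by
            apply vMax_zero_of_not_mem
            intro hmem
            apply hc
            rw [hD, PySem.Dict.contains_iff_mem_keys, keys_eq, PySem.Set.mem_ofList]
            exact hmem
          rw [hk0]
          have : (0:Int) ≤ ((strChars w).count k : Int) := Int.natCast_nonneg _
          omega
      · rw [if_neg hkw, ih, hv, List.count_eq_zero.mpr hkw]
        have := vMax_nonneg k t
        simp
        omega

lemma maxD_eq_vMax {k : String} {ws : List String} (h : ws ≠ []) :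
    PySem.List.maxD (ws.map (fun w => ((strChars w).count k : Int))) (fun x => x) 0
      = vMax k ws := by
  obtain ⟨w, t, rfl⟩ := List.exists_cons_of_ne_nil h
  unfold PySem.List.maxD vMax
  simp only [List.map_cons]
  rw [PySem.List.max?_id_cons]
  simp only [Option.getD_some, List.foldl_cons]
  have h0 : max (0:Int) ((strChars w).count k : Int) = ((strChars w).count k : Int) := by
    have : (0:Int) ≤ ((strChars w).count k : Int) := Int.natCast_nonneg _
    omega
  rw [h0]

-- ===== VERDICT (by name: the statement is the Claim_ definition above) =====
theorem get_max_letter_counts_spec : Claim_equal_get_max_letter_counts := by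
  intro words _
  unfold Spec_get_max_letter_counts get_max_letter_counts_alt
  rw [aDict_eq,
      PySem.Dict.items_eq_map_keys _ (keys_nodup words) 0,
      keys_eq]
  simp only [PySem.List.dedup_eq_ofList]
  apply List.map_congr_left
  intro ch hch
  rw [getD_eq]
  have hmem : ch ∈ (words.map strChars).flatten := (PySem.Set.mem_ofList _ _).mp hch
  have hne : words ≠ [] := by
    rintro rfl
    simp at hmem
  rw [maxD_eq_vMax hne]
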